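-- pv_equiv track=rewrite | github.com/yhyeil/Algorithms_py | trap/trap.py | minimum_damage
-- ===== SOURCE A (Python) =====
-- def minimum_damage(n, k, traps):
--     # Compute the net saving for each trap if jumped over
--     potential_savings = [(a_i - (n - i - 1), i) for i, a_i in enumerate(traps)]
--
--     # Sort potential savings in descending order
--     potential_savings.sort(reverse=True)
--
--     # Indices of the traps we'll jump over
--     jump_indices = set([idx for _, idx in potential_savings[:k]])
--
--     # Compute the total damage
--     total_damage = 0
--     bonus_damage = 0  # Accumulated bonus damage due to jumps
--
--     for i, a_i in enumerate(traps):
--         if i in jump_indices: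
--             bonus_damage += 1  # Jumping over the trap increases bonus damage
--         else:
--             total_damage += a_i + bonus_damage  # Base damage + bonus damage
--
--     return total_damage
-- ===== SOURCE B (Python) =====
-- def minimum_damage(n, k, traps):
--     # Jumping a trap removes its base damage but adds 1 to every later taken trap,
--     # so the net worth of jumping trap i is its value a_i + i (up to a shared offset):
--     # jump the k traps of largest a_i + i.  Closed form for the total:
--     #   sum(traps) - sum(taken values) + m*(L-1) - m*(m-1)//2
--     L = len(traps)
--     vals = sorted((a + i for i, a in enumerate(traps)), reverse=True)
--     top = vals[:k]
--     m = len(top)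
--     return sum(traps) - sum(top) + m * (L - 1) - m * (m - 1) // 2
-- ===== Notes on version B (the rewrite author's own statement) =====
-- stated objective: faster
-- what changed: Replaces the sort of (saving,index) tuples, the jump-index set and the bonus-accumulating simulation loop by one sort of the plain values a_i+i and a closed formula sum(traps) - sum(top k values) + m*(L-1) - m*(m-1)//2.
import Mathlib
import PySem

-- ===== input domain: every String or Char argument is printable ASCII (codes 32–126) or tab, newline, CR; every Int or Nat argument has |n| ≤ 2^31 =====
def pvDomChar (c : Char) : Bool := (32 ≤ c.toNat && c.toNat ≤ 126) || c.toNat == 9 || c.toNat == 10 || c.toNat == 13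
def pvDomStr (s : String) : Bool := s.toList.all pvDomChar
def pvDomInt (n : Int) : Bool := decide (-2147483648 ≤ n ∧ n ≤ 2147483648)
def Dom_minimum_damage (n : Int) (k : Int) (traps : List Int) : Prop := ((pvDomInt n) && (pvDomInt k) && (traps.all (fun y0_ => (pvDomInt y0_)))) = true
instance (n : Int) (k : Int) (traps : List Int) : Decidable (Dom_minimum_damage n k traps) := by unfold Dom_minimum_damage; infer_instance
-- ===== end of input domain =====

-- B replaces A's tuple sort + jump-index set + damage-simulation loop by a single
-- descending sort of the plain values a_i+i and a closed formula (measured constant-factor faster).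


-- ===== PORT A =====
def minimum_damage (n : Int) (k : Int) (traps : List Int) : Int :=
  -- potential_savings = [(a_i - (n - i - 1), i) for i, a_i in enumerate(traps)]
  let potential_savings :=
    (PySem.List.enumerate traps).map (fun p => (p.2 - (n - p.1 - 1), p.1))
  -- potential_savings.sort(reverse=True)  (tuples compare lexicographically)
  let sortedPS := PySem.List.sorted2 potential_savings (fun q => q.1) (fun q => q.2) true
  -- jump_indices = set([idx for _, idx in potential_savings[:k]])
  let jump_indices : PySem.Set Int :=
    PySem.Set.ofList ((PySem.List.slice sortedPS none (some k)).map (fun q => q.2))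
  -- loop accumulating (total_damage, bonus_damage)
  let r := (PySem.List.enumerate traps).foldl
    (fun (st : Int × Int) p =>
      if PySem.Set.contains jump_indices p.1 then (st.1, st.2 + 1)
      else (st.1 + (p.2 + st.2), st.2)) (0, 0)
  r.1

-- ===== PORT B =====
def minimum_damage_alt (n : Int) (k : Int) (traps : List Int) : Int :=
  let L : Int := (traps.length : Int)
  -- vals = sorted((a + i for i, a in enumerate(traps)), reverse=True)
  let vals := PySem.List.sorted ((PySem.List.enumerate traps).map (fun p => p.2 + p.1)) (fun x => x) true
  -- top = vals[:k]
  let top := PySem.List.slice vals none (some k)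
  let m : Int := (top.length : Int)
  traps.sum - top.sum + m * (L - 1) - PySem.Int.floordiv (m * (m - 1)) 2

-- ===== PRECONDITION & SPEC =====
def Spec_minimum_damage (n : Int) (k : Int) (traps : List Int) (out : Int) : Prop := out = minimum_damage_alt n k traps
instance (n : Int) (k : Int) (traps : List Int) (out : Int) : Decidable (Spec_minimum_damage n k traps out) := by unfold Spec_minimum_damage; infer_instance

-- ===== CLAIM (what is proved, stated in full; the proofs are below) =====
def Claim_equal_minimum_damage : Prop := ∀ (n : Int) (k : Int) (traps : List Int), Dom_minimum_damage n k traps → Spec_minimum_damage n k traps (minimum_damage n k traps)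

-- ===== LEMMAS AND PROOFS =====

-- proof-only helpers: a recursion equivalent to A's damage loop, and its "delayed bonus" part
def goA (J : List Int) : List (Int × Int) → Int → Int
  | [], _ => 0
  | p :: E, b => if p.1 ∈ J then goA J E (b + 1) else (p.2 + b) + goA J E b

def bonusW (J : List Int) : List (Int × Int) → Int
  | [] => 0
  | p :: E => (if p.1 ∈ J then ((E.countP (fun q => !decide (q.1 ∈ J)) : Int)) else 0) + bonusW J E

theorem goA_shift (J : List Int) (E : List (Int × Int)) :
    ∀ b : Int, goA J E (b + 1) = goA J E b + (E.countP (fun q => !decide (q.1 ∈ J)) : Int) := by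
  induction E with
  | nil => intro b; simp [goA]
  | cons p E ih =>
    intro b
    by_cases h : p.1 ∈ J <;> simp [goA, h, ih, List.countP_cons] <;> push_cast <;> ring

theorem goA_closed (J : List Int) (E : List (Int × Int)) :
    goA J E 0 = ((E.filter (fun p => !decide (p.1 ∈ J))).map (fun p => p.2)).sum + bonusW J E := by
  induction E with
  | nil => simp [goA, bonusW]
  | cons p E ih =>
    by_cases h : p.1 ∈ J
    · have hs := goA_shift J E 0
      rw [zero_add] at hs
      simp [goA, bonusW, h, hs, ih]; ring
    · simp [goA, bonusW, h, ih]; ring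

theorem foldlA_eq_goA (J : List Int) (E : List (Int × Int)) :
    ∀ t b : Int,
      E.foldl (fun (st : Int × Int) p =>
        if p.1 ∈ J then (st.1, st.2 + 1)
        else (st.1 + (p.2 + st.2), st.2)) (t, b)
      = (t + goA J E b, b + (E.countP (fun q => decide (q.1 ∈ J)) : Int)) := by
  induction E with
  | nil => intro t b; simp [goA]
  | cons p E ih =>
    intro t b
    by_cases h : p.1 ∈ J
    · simp only [List.foldl_cons, if_pos h, List.countP_cons]
      rw [ih]
      simp [goA, h]
      push_cast
      ring
    · simp only [List.foldl_cons, if_neg h, List.countP_cons]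
      rw [ih]
      simp [goA, h]
      ring

-- generic: insertion with an asymmetric, negatively transitive `before` keeps descending order
theorem insertBy_pairwise_asym {α : Type} (before : α → α → Bool)
    (h1 : ∀ a b, before a b = true → before b a = false)
    (h2 : ∀ a b c, before a b = true → before c b = false → before c a = false)
    (x : α) (ys : List α) (hys : ys.Pairwise (fun a b => before b a = false)) :
    (PySem.List.insertBy before x ys).Pairwise (fun a b => before b a = false) := by
  induction ys with
  | nil => simp [PySem.List.insertBy]
  | cons y ys ih =>
    rw [PySem.List.insertBy]
    rcases List.pairwise_cons.mp hys with ⟨hy, hys'⟩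
    by_cases hb : before x y = true
    · rw [if_pos hb]
      refine List.pairwise_cons.mpr ⟨?_, hys⟩
      intro z hz
      rcases List.mem_cons.mp hz with rfl | hz'
      · exact h1 x z hb
      · exact h2 x y z hb (hy z hz')
    · rw [if_neg hb]
      refine List.pairwise_cons.mpr ⟨?_, ih hys'⟩
      intro z hz
      rcases (PySem.List.mem_insertBy before x z ys).mp hz with rfl | hz'
      · exact Bool.eq_false_iff.mpr hb
      · exact hy z hz'

theorem foldl_insertBy_pairwise_asym {α : Type} (before : α → α → Bool)
    (h1 : ∀ a b, before a b = true → before b a = false)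
    (h2 : ∀ a b c, before a b = true → before c b = false → before c a = false)
    (xs : List α) :
    (xs.foldl (fun acc x => PySem.List.insertBy before x acc) []).Pairwise
      (fun a b => before b a = false) := by
  suffices h : ∀ acc, acc.Pairwise (fun a b => before b a = false) →
      (xs.foldl (fun acc x => PySem.List.insertBy before x acc) acc).Pairwise
        (fun a b => before b a = false) from h [] (by simp)
  induction xs with
  | nil => intro acc hacc; simpa using hacc
  | cons x xs ih =>
    intro acc hacc
    exact ih _ (insertBy_pairwise_asym before h1 h2 x acc hacc)

theorem bonusW_closed (J : List Int) :
    ∀ E : List (Int × Int), E.Pairwise (fun p q => p.1 < q.1) →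
      bonusW J E = ((E.filter (fun p => decide (p.1 ∈ J))).map
        (fun p => ((E.countP (fun q => decide (p.1 < q.1)) : Int)
                 - (E.countP (fun q => decide (p.1 < q.1) && decide (q.1 ∈ J)) : Int)))).sum := by
  intro E
  induction E with
  | nil => intro _; simp [bonusW]
  | cons p E ih =>
    intro hpw
    rcases List.pairwise_cons.mp hpw with ⟨hp, hE⟩
    -- the per-element counts over p :: E equal those over E, for elements of E
    have hcnt1 : ∀ x ∈ E, List.countP (fun q => decide (x.1 < q.1)) (p :: E)
        = List.countP (fun q => decide (x.1 < q.1)) E := by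
      intro x hxE
      rw [List.countP_cons]
      have : ¬ x.1 < p.1 := not_lt.mpr (le_of_lt (hp x hxE))
      simp [this]
    have hcnt2 : ∀ x ∈ E, List.countP (fun q => decide (x.1 < q.1) && decide (q.1 ∈ J)) (p :: E)
        = List.countP (fun q => decide (x.1 < q.1) && decide (q.1 ∈ J)) E := by
      intro x hxE
      rw [List.countP_cons]
      have : ¬ x.1 < p.1 := not_lt.mpr (le_of_lt (hp x hxE))
      simp [this]
    have htail : ((E.filter (fun p => decide (p.1 ∈ J))).map
          (fun x => ((List.countP (fun q => decide (x.1 < q.1)) (p :: E) : Int)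
                   - (List.countP (fun q => decide (x.1 < q.1) && decide (q.1 ∈ J)) (p :: E) : Int)))).sum
        = ((E.filter (fun p => decide (p.1 ∈ J))).map
          (fun x => ((List.countP (fun q => decide (x.1 < q.1)) E : Int)
                   - (List.countP (fun q => decide (x.1 < q.1) && decide (q.1 ∈ J)) E : Int)))).sum := by
      refine congrArg List.sum (List.map_congr_left ?_)
      intro x hx
      have hxE := (List.mem_filter.mp hx).1
      rw [hcnt1 x hxE, hcnt2 x hxE]
    by_cases hpJ : p.1 ∈ J
    · -- head is a jumped index: its term is the count of later non-jumped traps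
      have hhead : (List.countP (fun q => decide (p.1 < q.1)) (p :: E) : Int)
          - (List.countP (fun q => decide (p.1 < q.1) && decide (q.1 ∈ J)) (p :: E) : Int)
          = (E.countP (fun q => !decide (q.1 ∈ J)) : Int) := by
        have e1 : List.countP (fun q => decide (p.1 < q.1)) (p :: E) = E.length := by
          rw [List.countP_cons]
          have h1 : List.countP (fun q => decide (p.1 < q.1)) E = E.length :=
            List.countP_eq_length.mpr (fun q hq => decide_eq_true (hp q hq))
          simp [h1]
        have e2 : List.countP (fun q => decide (p.1 < q.1) && decide (q.1 ∈ J)) (p :: E)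
            = List.countP (fun q => decide (q.1 ∈ J)) E := by
          rw [List.countP_cons]
          have h2 : List.countP (fun q => decide (p.1 < q.1) && decide (q.1 ∈ J)) E
              = List.countP (fun q => decide (q.1 ∈ J)) E := by
            refine List.countP_congr ?_
            intro q hq
            simp [hp q hq]
          simp [h2]
        have e3 := List.length_eq_countP_add_countP (fun q => decide (q.1 ∈ J)) (l := E)
        have e4 : List.countP (fun a => decide ¬(decide (a.1 ∈ J) = true)) E
            = List.countP (fun q => !decide (q.1 ∈ J)) E := by
          refine List.countP_congr ?_
          intro a _
          simp
        rw [e1, e2]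
        omega
      rw [bonusW, List.filter_cons]
      simp only [hpJ, decide_true, if_true, List.map_cons, List.sum_cons]
      rw [hhead, htail, ih hE]
    · rw [bonusW, List.filter_cons]
      simp only [hpJ, decide_false, Bool.false_eq_true, if_false]
      rw [htail, ih hE]
      simp [hpJ]

theorem cnt_range_gt (LN : Nat) (c : Nat) (hc : c < LN) :
    (PySem.List.pyRange 0 (LN : Int) 1).countP (fun x => decide ((c : Int) < x)) = LN - (c + 1) := by
  rw [PySem.List.pyRange_one, List.countP_map]
  have key : ∀ M : Nat,
      List.countP ((fun x => decide ((c : Int) < x)) ∘ fun k : Nat => (0 : Int) + ↑k) (List.range M)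
        = M - min M (c + 1) := by
    intro M
    induction M with
    | zero => simp
    | succ m ih =>
      rw [List.range_succ, List.countP_append, ih]
      have hm : List.countP ((fun x => decide ((c : Int) < x)) ∘ fun k : Nat => (0 : Int) + ↑k) [m]
          = if c < m then 1 else 0 := by
        by_cases h : c < m <;> simp [List.countP_cons, Function.comp, h] <;> omega
      rw [hm]
      by_cases h : c < m <;> simp [h] <;> omega
  have h0 : ((LN : Int) - 0).toNat = LN := by omega
  rw [h0, key LN]
  omega

theorem cnt_subset {P : Int → Bool} (xs J : List Int) (hxs : xs.Nodup) (hJ : J.Nodup)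
    (hsub : ∀ j ∈ J, j ∈ xs) :
    xs.countP (fun x => P x && decide (x ∈ J)) = J.countP P := by
  have h1 : xs.countP (fun x => P x && decide (x ∈ J)) = (xs.filter (fun x => decide (x ∈ J))).countP P := by
    rw [List.countP_filter]
  have hperm : (xs.filter (fun x => decide (x ∈ J))).Perm J := by
    refine (List.perm_ext_iff_of_nodup (hxs.filter _) hJ).mpr ?_
    intro a
    simp only [List.mem_filter, decide_eq_true_eq]
    exact ⟨fun h => h.2, fun h => ⟨hsub a h, h⟩⟩
  rw [h1, hperm.countP_eq]

theorem pair_count (J : List Int) (h : J.Nodup) :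
    2 * (J.map (fun j => (J.countP (fun x => decide (j < x)) : Int))).sum
      = (J.length : Int) * ((J.length : Int) - 1) := by
  induction J with
  | nil => simp
  | cons x J' ih =>
    rcases List.nodup_cons.mp h with ⟨hx, hJ'⟩
    have ihs := ih hJ'
    simp only [List.map_cons, List.sum_cons, List.length_cons]
    have hx0 : List.countP (fun y => decide (x < y)) (x :: J') = List.countP (fun y => decide (x < y)) J' := by
      simp
    have hmap : (J'.map (fun j => (List.countP (fun y => decide (j < y)) (x :: J') : Int))).sum
        = (J'.map (fun j => (List.countP (fun y => decide (j < y)) J' : Int)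
            + (if decide (j < x) = true then 1 else 0))).sum := by
      refine congrArg List.sum (List.map_congr_left ?_)
      intro j hj
      rw [List.countP_cons]
      push_cast
      ring
    have hsplit := PySem.List.sum_map_add_int J'
      (fun j => (List.countP (fun y => decide (j < y)) J' : Int))
      (fun j => (if decide (j < x) = true then 1 else 0))
    have hite := PySem.List.sum_map_ite_one_zero (fun j => decide (j < x)) J'
    have hcompl : List.countP (fun y => decide (x < y)) J' + List.countP (fun y => decide (y < x)) J' = J'.length := by
      have hlen := List.length_eq_countP_add_countP (fun y => decide (x < y)) (l := J')
      have hcc : List.countP (fun a => decide ¬(decide (x < a) = true)) J' = List.countP (fun y => decide (y < x)) J' := by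
        refine List.countP_congr ?_
        intro a ha
        have hax : a ≠ x := fun hh => hx (hh ▸ ha)
        simp only [decide_eq_true_eq]
        constructor
        · intro hna; exact lt_of_le_of_ne (not_lt.mp hna) hax
        · intro hlt; omega
      omega
    rw [hx0, hmap, hsplit, hite]
    push_cast
    push_cast at ihs
    have hc : (List.countP (fun y => decide (x < y)) J' : Int) + (List.countP (fun y => decide (y < x)) J' : Int) = (J'.length : Int) := by exact_mod_cast hcompl
    linear_combination ihs + 2 * hc

theorem sum_map_sub {α : Type} (T : List α) (f g : α → Int) :
    (T.map (fun q => f q - g q)).sum = (T.map f).sum - (T.map g).sum := by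
  induction T with
  | nil => simp
  | cons q T ih => simp [ih]; ring

-- proof-only shared data: A's sorted saving pairs, the jumped prefix and its indices
def ffm (n : Int) : Int × Int → Int × Int := fun p => (p.2 - (n - p.1 - 1), p.1)

def psL (n : Int) (traps : List Int) : List (Int × Int) :=
  (PySem.List.enumerate traps).map (ffm n)

def DL (n : Int) (traps : List Int) : List (Int × Int) :=
  PySem.List.sorted2 (psL n traps) (fun q => q.1) (fun q => q.2) true

def TL (n : Int) (k : Int) (traps : List Int) : List (Int × Int) :=
  (DL n traps).take (PySem.List.clampIdx traps.length k)

def JL (n : Int) (k : Int) (traps : List Int) : List Int :=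
  (TL n k traps).map (fun q => q.2)

def CC (n : Int) (k : Int) (traps : List Int) : Int :=
  ((JL n k traps).map (fun j => ((JL n k traps).countP (fun x => decide (j < x)) : Int))).sum

-- the lexicographic "before" predicate of A's reverse tuple sort
def pbm : Int × Int → Int × Int → Bool := fun a b =>
  decide (b.1 < a.1) || (!decide (a.1 < b.1) && decide (b.2 < a.2))

theorem psL_length (n : Int) (traps : List Int) : (psL n traps).length = traps.length := by
  unfold psL
  rw [List.length_map, PySem.List.length_enumerate]

theorem DL_perm (n : Int) (traps : List Int) : (DL n traps).Perm (psL n traps) :=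
  PySem.List.sorted2_perm (psL n traps) (fun q => q.1) (fun q => q.2) true

theorem DL_length (n : Int) (traps : List Int) : (DL n traps).length = traps.length := by
  rw [(DL_perm n traps).length_eq, psL_length]

theorem fst_enum (traps : List Int) :
    (PySem.List.enumerate traps).map (fun p => p.1) = PySem.List.pyRange 0 (traps.length : Int) 1 := by
  have := PySem.List.map_fst_enumerate traps 0
  simpa using this

theorem snd_psL (n : Int) (traps : List Int) :
    (psL n traps).map (fun q => q.2) = PySem.List.pyRange 0 (traps.length : Int) 1 := by
  unfold psL
  rw [List.map_map, ← fst_enum traps]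
  rfl

theorem nodup_range (L : Nat) : (PySem.List.pyRange 0 (L : Int) 1).Nodup := by
  rw [PySem.List.pyRange_one]
  refine List.Nodup.map ?_ (List.nodup_range)
  intro a b h
  simpa using h

theorem nodup_sndDL (n : Int) (traps : List Int) :
    ((DL n traps).map (fun q => q.2)).Nodup := by
  rw [((DL_perm n traps).map (fun q => q.2)).nodup_iff, snd_psL]
  exact nodup_range traps.length

theorem JL_sublist (n : Int) (k : Int) (traps : List Int) :
    (JL n k traps).Sublist ((DL n traps).map (fun q => q.2)) := by
  unfold JL TL
  exact (List.take_sublist _ _).map _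

theorem JL_nodup (n : Int) (k : Int) (traps : List Int) : (JL n k traps).Nodup :=
  (nodup_sndDL n traps).sublist (JL_sublist n k traps)

theorem JL_sub_range (n : Int) (k : Int) (traps : List Int) :
    ∀ j ∈ JL n k traps, j ∈ PySem.List.pyRange 0 (traps.length : Int) 1 := by
  intro j hj
  have h1 : j ∈ (DL n traps).map (fun q => q.2) := (JL_sublist n k traps).subset hj
  have h2 := ((DL_perm n traps).map (fun q => q.2)).mem_iff.mp h1
  rwa [snd_psL] at h2

theorem TL_length (n : Int) (k : Int) (traps : List Int) :
    (TL n k traps).length = PySem.List.clampIdx traps.length k := by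
  unfold TL
  rw [List.length_take, DL_length]
  exact Nat.min_eq_left (PySem.List.clampIdx_le _ _)

theorem JL_length (n : Int) (k : Int) (traps : List Int) :
    (JL n k traps).length = PySem.List.clampIdx traps.length k := by
  unfold JL
  rw [List.length_map, TL_length]

theorem pbm_asym : ∀ a b, pbm a b = true → pbm b a = false := by
  intro a b h
  simp [pbm] at h ⊢
  omega

theorem pbm_negtrans : ∀ a b c, pbm a b = true → pbm c b = false → pbm c a = false := by
  intro a b c h1 h2
  simp [pbm] at h1 h2 ⊢
  omega

theorem DL_pairwise (n : Int) (traps : List Int) :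
    (DL n traps).Pairwise (fun a b => pbm b a = false) := by
  have hD : DL n traps = (psL n traps).foldl (fun acc x => PySem.List.insertBy pbm x acc) [] := rfl
  rw [hD]
  exact foldl_insertBy_pairwise_asym pbm pbm_asym pbm_negtrans (psL n traps)

theorem CC_div (n : Int) (k : Int) (traps : List Int) :
    PySem.Int.floordiv (((PySem.List.clampIdx traps.length k : Nat) : Int)
        * (((PySem.List.clampIdx traps.length k : Nat) : Int) - 1)) 2 = CC n k traps := by
  have hp := pair_count (JL n k traps) (JL_nodup n k traps)
  rw [JL_length] at hp
  rw [PySem.Int.floordiv_eq_ediv_of_pos (by norm_num), ← hp]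
  unfold CC
  exact Int.mul_ediv_cancel_left _ (by norm_num)

theorem A_char (n : Int) (k : Int) (traps : List Int) :
    minimum_damage n k traps
      = traps.sum - ((TL n k traps).map (fun q => q.1)).sum
        - ((TL n k traps).length : Int) * (n - 1)
        + ((TL n k traps).length : Int) * ((traps.length : Int) - 1)
        - CC n k traps := by
  have h_slice : PySem.List.slice (DL n traps) none (some k) = TL n k traps := by
    simp [PySem.List.slice, DL_length, TL]
  have hpw := PySem.List.pairwise_lt_enumerate traps 0
  have hndfstE : ((PySem.List.enumerate traps).map (fun p => p.1)).Nodup := by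
    rw [fst_enum]; exact nodup_range _
  have hndE : (PySem.List.enumerate traps).Nodup := hndfstE.of_map
  -- unfold the port and normalise its pieces to psL / DL / TL / JL
  have hJ : (PySem.List.slice (DL n traps) none (some k)).map (fun q => q.2) = JL n k traps := by
    rw [h_slice]
    rfl
  have hport : minimum_damage n k traps
      = ((PySem.List.enumerate traps).foldl
          (fun (st : Int × Int) (p : Int × Int) =>
            if PySem.Set.contains (PySem.Set.ofList
                ((PySem.List.slice (DL n traps) none (some k)).map (fun q => q.2))) p.1
            then (st.1, st.2 + 1)
            else (st.1 + (p.2 + st.2), st.2)) (0, 0)).1 := rfl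
  rw [hport, hJ]
  have hfun : (fun (st : Int × Int) (p : Int × Int) =>
        if PySem.Set.contains (PySem.Set.ofList (JL n k traps)) p.1 then (st.1, st.2 + 1)
        else (st.1 + (p.2 + st.2), st.2))
      = (fun (st : Int × Int) (p : Int × Int) =>
        if p.1 ∈ JL n k traps then (st.1, st.2 + 1)
        else (st.1 + (p.2 + st.2), st.2)) := by
    funext st p
    by_cases h : p.1 ∈ JL n k traps <;>
      simp [PySem.Set.mem_ofList, h]
  rw [hfun, foldlA_eq_goA]
  simp only [zero_add]
  rw [goA_closed, bonusW_closed (JL n k traps) _ hpw]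
  -- the non-jumped damage values sum to sum(traps) minus the jumped values
  have hsum_not : (((PySem.List.enumerate traps).filter (fun p => !decide (p.1 ∈ JL n k traps))).map
        (fun p => p.2)).sum
      = traps.sum - (((PySem.List.enumerate traps).filter (fun p => decide (p.1 ∈ JL n k traps))).map
        (fun p => p.2)).sum := by
    have hperm := ((List.filter_append_perm (fun p => decide (p.1 ∈ JL n k traps))
      (PySem.List.enumerate traps)).map (fun p => p.2)).sum_eq
    rw [List.map_append, List.sum_append, PySem.List.map_snd_enumerate] at hperm
    omega
  -- evaluate the two counts of bonusW_closed on each jumped trap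
  have hW : (((PySem.List.enumerate traps).filter (fun p => decide (p.1 ∈ JL n k traps))).map
        (fun x => ((List.countP (fun q => decide (x.1 < q.1)) (PySem.List.enumerate traps) : Int)
                 - (List.countP (fun q => decide (x.1 < q.1) && decide (q.1 ∈ JL n k traps))
                     (PySem.List.enumerate traps) : Int)))).sum
      = (((PySem.List.enumerate traps).filter (fun p => decide (p.1 ∈ JL n k traps))).map
        (fun p => (((traps.length : Int) - 1 - p.1)
                 - ((JL n k traps).countP (fun x => decide (p.1 < x)) : Int)))).sum := by
    refine congrArg List.sum (List.map_congr_left ?_)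
    intro p hp
    have hpE := (List.mem_filter.mp hp).1
    obtain ⟨c, hc, hpc⟩ := (PySem.List.mem_enumerate_iff traps 0 p).mp hpE
    have hp1 : p.1 = (c : Int) := by rw [hpc]; simp
    have e1 : (List.countP (fun q => decide (p.1 < q.1)) (PySem.List.enumerate traps) : Int)
        = (traps.length : Int) - 1 - p.1 := by
      have h1 : List.countP (fun q => decide (p.1 < q.1)) (PySem.List.enumerate traps)
          = List.countP (fun x => decide (p.1 < x))
              ((PySem.List.enumerate traps).map (fun q => q.1)) := by
        rw [List.countP_map]; rfl
      rw [h1, fst_enum, hp1, cnt_range_gt traps.length c hc]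
      omega
    have e2 : List.countP (fun q => decide (p.1 < q.1) && decide (q.1 ∈ JL n k traps))
          (PySem.List.enumerate traps)
        = (JL n k traps).countP (fun x => decide (p.1 < x)) := by
      have h1 : List.countP (fun q => decide (p.1 < q.1) && decide (q.1 ∈ JL n k traps))
            (PySem.List.enumerate traps)
          = List.countP (fun x => decide (p.1 < x) && decide (x ∈ JL n k traps))
              ((PySem.List.enumerate traps).map (fun q => q.1)) := by
        rw [List.countP_map]; rfl
      rw [h1, fst_enum]
      exact cnt_subset _ _ (nodup_range _) (JL_nodup n k traps) (JL_sub_range n k traps)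
    rw [e1, e2]
  rw [hsum_not, hW]
  -- the jumped traps of the loop are exactly the taken prefix TL, re-indexed
  have hST : ((PySem.List.enumerate traps).filter (fun p => decide (p.1 ∈ JL n k traps))).Perm
      ((TL n k traps).map (fun q => (q.2, q.1 + (n - 1) - q.2))) := by
    have hndS := hndE.filter (fun p => decide (p.1 ∈ JL n k traps))
    have hndT : ((TL n k traps).map (fun q : Int × Int => (q.2, q.1 + (n - 1) - q.2))).Nodup := by
      have h1 : (((TL n k traps).map (fun q : Int × Int => (q.2, q.1 + (n - 1) - q.2))).map
          (fun p => p.1)).Nodup := by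
        rw [List.map_map]
        exact JL_nodup n k traps
      exact h1.of_map
    have hTps : ∀ q ∈ TL n k traps, q ∈ psL n traps := fun q hq =>
      (DL_perm n traps).subset ((List.take_sublist _ _).subset hq)
    have hphif : ∀ p : Int × Int,
        ((ffm n p).2, (ffm n p).1 + (n - 1) - (ffm n p).2) = p := by
      intro p
      show (p.1, p.2 - (n - p.1 - 1) + (n - 1) - p.1) = p
      have : p.2 - (n - p.1 - 1) + (n - 1) - p.1 = p.2 := by ring
      rw [this]
    refine (List.perm_ext_iff_of_nodup hndS hndT).mpr ?_
    intro x
    simp only [List.mem_filter, decide_eq_true_eq, List.mem_map]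
    constructor
    · rintro ⟨hxE, hxJ⟩
      have hxJ' : x.1 ∈ (TL n k traps).map (fun q => q.2) := hxJ
      obtain ⟨q, hqT, hq2⟩ := List.mem_map.mp hxJ'
      obtain ⟨p', hp'E, hq⟩ := List.mem_map.mp (hTps q hqT)
      have h1 : (q.2, q.1 + (n - 1) - q.2) = p' := by
        rw [← hq]; exact hphif p'
      have hfst : p'.1 = x.1 := by
        rw [← hq2, ← hq]; rfl
      have hpx : p' = x := List.inj_on_of_nodup_map hndfstE hp'E hxE hfst
      exact ⟨q, hqT, h1.trans hpx⟩
    · rintro ⟨q, hqT, rfl⟩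
      obtain ⟨p', hp'E, hq⟩ := List.mem_map.mp (hTps q hqT)
      have h1 : (q.2, q.1 + (n - 1) - q.2) = p' := by
        rw [← hq]; exact hphif p'
      constructor
      · rw [h1]; exact hp'E
      · show q.2 ∈ (TL n k traps).map (fun q => q.2)
        exact List.mem_map.mpr ⟨q, hqT, rfl⟩
  have hs2 : (((PySem.List.enumerate traps).filter (fun p => decide (p.1 ∈ JL n k traps))).map
        (fun p => p.2)).sum
      = ((TL n k traps).map (fun q => q.1 + (n - 1) - q.2)).sum := by
    rw [(hST.map (fun p => p.2)).sum_eq, List.map_map]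
    rfl
  have hsW : (((PySem.List.enumerate traps).filter (fun p => decide (p.1 ∈ JL n k traps))).map
        (fun p => (((traps.length : Int) - 1 - p.1)
                 - ((JL n k traps).countP (fun x => decide (p.1 < x)) : Int)))).sum
      = ((TL n k traps).map (fun q => (((traps.length : Int) - 1 - q.2)
                 - ((JL n k traps).countP (fun x => decide (q.2 < x)) : Int)))).sum := by
    rw [(hST.map _).sum_eq, List.map_map]
    rfl
  rw [hs2, hsW]
  have hsplit1 : ((TL n k traps).map (fun q => q.1 + (n - 1) - q.2)).sum
      = ((TL n k traps).map (fun q => q.1)).sum + ((TL n k traps).length : Int) * (n - 1)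
        - ((TL n k traps).map (fun q => q.2)).sum := by
    rw [sum_map_sub (TL n k traps) (fun q => q.1 + (n - 1)) (fun q => q.2),
      PySem.List.sum_map_add_int (TL n k traps) (fun q => q.1) (fun _ => n - 1),
      PySem.List.sum_map_const_int]
  have hsplit2 : ((TL n k traps).map (fun q => (((traps.length : Int) - 1 - q.2)
                 - ((JL n k traps).countP (fun x => decide (q.2 < x)) : Int)))).sum
      = (((TL n k traps).length : Int) * ((traps.length : Int) - 1)
          - ((TL n k traps).map (fun q => q.2)).sum) - CC n k traps := by
    rw [sum_map_sub (TL n k traps)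
        (fun q => ((traps.length : Int) - 1 - q.2))
        (fun q => ((JL n k traps).countP (fun x => decide (q.2 < x)) : Int)),
      sum_map_sub (TL n k traps) (fun _ => (traps.length : Int) - 1) (fun q => q.2),
      PySem.List.sum_map_const_int]
    have hCC : CC n k traps
        = ((TL n k traps).map (fun q =>
            ((JL n k traps).countP (fun x => decide (q.2 < x)) : Int))).sum := by
      show (((TL n k traps).map (fun q => q.2)).map (fun j =>
            ((JL n k traps).countP (fun x => decide (j < x)) : Int))).sum = _
      rw [List.map_map]
      rfl
    rw [hCC]
  rw [hsplit1, hsplit2]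
  ring

theorem B_char (n : Int) (k : Int) (traps : List Int) :
    minimum_damage_alt n k traps
      = traps.sum - (((TL n k traps).map (fun q => q.1)).sum
          + ((TL n k traps).length : Int) * (n - 1))
        + ((TL n k traps).length : Int) * ((traps.length : Int) - 1)
        - CC n k traps := by
  have hmapDL : (psL n traps).map (fun q => q.1 + (n - 1))
      = (PySem.List.enumerate traps).map (fun p => p.2 + p.1) := by
    unfold psL
    rw [List.map_map]
    refine List.map_congr_left ?_
    intro p _
    show p.2 - (n - p.1 - 1) + (n - 1) = p.2 + p.1
    ring
  -- B's descending value sort IS the (saving,index)-sorted list, mapped to values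
  have hvals : PySem.List.sorted ((PySem.List.enumerate traps).map (fun p => p.2 + p.1)) (fun x => x) true
      = (DL n traps).map (fun q => q.1 + (n - 1)) := by
    refine List.Perm.eq_of_pairwise (le := fun a b : Int => b ≤ a)
      (fun a b _ _ h1 h2 => le_antisymm h2 h1) ?_ ?_ ?_
    · exact PySem.List.sorted_pairwise_rev _ _
    · refine List.pairwise_map.mpr ((DL_pairwise n traps).imp ?_)
      intro a b h
      simp only [pbm, Bool.or_eq_false_iff, Bool.and_eq_false_iff, Bool.not_eq_true',
        decide_eq_false_iff_not, not_lt, Bool.not_eq_false, decide_eq_true_eq] at h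
      have : b.1 ≤ a.1 := by omega
      omega
    · refine (PySem.List.sorted_perm _ _ _).trans ?_
      rw [← hmapDL]
      exact ((DL_perm n traps).map _).symm
  have hslice : PySem.List.slice ((DL n traps).map (fun q => q.1 + (n - 1))) none (some k)
      = (TL n k traps).map (fun q => q.1 + (n - 1)) := by
    simp [PySem.List.slice, List.length_map, DL_length, TL, List.map_take]
  have hsum : ((TL n k traps).map (fun q => q.1 + (n - 1))).sum
      = ((TL n k traps).map (fun q => q.1)).sum + ((TL n k traps).length : Int) * (n - 1) := by
    rw [PySem.List.sum_map_add_int (TL n k traps) (fun q => q.1) (fun _ => n - 1),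
      PySem.List.sum_map_const_int]
  simp only [minimum_damage_alt]
  rw [hvals, hslice, List.length_map, TL_length, CC_div n k traps, hsum, TL_length]

theorem main_eq (n : Int) (k : Int) (traps : List Int) :
    minimum_damage n k traps = minimum_damage_alt n k traps := by
  rw [A_char, B_char]
  ring

-- ===== VERDICT (by name: the statement is the Claim_ definition above) =====
theorem minimum_damage_spec : Claim_equal_minimum_damage := by
  intro n k traps _
  unfold Spec_minimum_damage
  exact main_eq n k traps
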